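-- pv_equiv track=rewrite | github.com/shubham14/Coding_Contest_solutions | DS-Algo/amazon_practice.py | optimalDistance
-- ===== SOURCE A (Python) =====
-- def optimalDistance(maxTravelDist, forwardRouteDist, returnRouteDist):
--     ans = []
--     temp = -1
--     for i in range(len(forwardRouteDist)):
--         for j in range(len(returnRouteDist)):
--             sum_dist = forwardRouteDist[i][1] + returnRouteDist[j][1]
--             if sum_dist <= maxTravelDist:
--                 if temp < sum_dist:
--                     temp = sum_dist
--                     ans = []
--                     ans.append([i + 1, j + 1])
--                 elif temp == sum_dist:
--                     ans.append([i + 1, j + 1])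
--     return ans
-- ===== SOURCE B (Python) =====
-- def optimalDistance(maxTravelDist, forwardRouteDist, returnRouteDist):
--     # Two-phase: find the best eligible sum once, then collect matching
--     # pairs via an index-list dictionary keyed by return distance.
--     if not forwardRouteDist or not returnRouteDist:
--         return []
--     fs = [row[1] for row in forwardRouteDist]
--     rs = [row[1] for row in returnRouteDist]
--     best = max([-1] + [f + r for f in fs for r in rs if f + r <= maxTravelDist])
--     if maxTravelDist < best:
--         return []
--     jd = {}
--     for j, r in enumerate(rs):
--         jd[r] = jd.get(r, []) + [j + 1]
--     return [[i + 1, j] for i, f in enumerate(fs) for j in jd.get(best - f, [])]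
-- ===== Notes on version B (the rewrite author's own statement) =====
-- stated objective: alternative
-- what changed: Replaces A's single pass that maintains and resets a best-pair list with a two-phase algorithm: one max-scan finds the best eligible sum, then pairs are collected via a dictionary mapping each return distance to its 1-based index list, so the result list is never rebuilt.
import Mathlib
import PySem

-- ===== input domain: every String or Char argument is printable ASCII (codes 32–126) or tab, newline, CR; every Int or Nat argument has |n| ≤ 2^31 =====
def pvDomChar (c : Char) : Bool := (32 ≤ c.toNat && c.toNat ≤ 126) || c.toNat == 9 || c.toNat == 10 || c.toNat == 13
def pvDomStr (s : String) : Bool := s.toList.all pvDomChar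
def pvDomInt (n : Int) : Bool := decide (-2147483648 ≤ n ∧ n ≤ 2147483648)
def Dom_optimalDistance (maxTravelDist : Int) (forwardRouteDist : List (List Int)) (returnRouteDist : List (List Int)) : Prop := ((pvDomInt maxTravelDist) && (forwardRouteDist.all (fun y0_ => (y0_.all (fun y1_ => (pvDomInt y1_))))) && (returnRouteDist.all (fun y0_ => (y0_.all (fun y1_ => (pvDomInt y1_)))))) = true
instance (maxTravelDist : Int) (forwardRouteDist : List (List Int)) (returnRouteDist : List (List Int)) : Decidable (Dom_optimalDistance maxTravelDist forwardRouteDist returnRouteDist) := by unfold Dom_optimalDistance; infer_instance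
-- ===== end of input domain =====

set_option maxRecDepth 8000
-- B replaces A's single pass (running best + reset-and-rebuild answer list) by a two-phase
-- algorithm: a max-scan for the best eligible sum, then collection of the matching pairs via a
-- dictionary mapping each return distance to its 1-based index list (objective: alternative).

-- ===== PORT A =====
def optimalDistance (maxTravelDist : Int) (forwardRouteDist : List (List Int)) (returnRouteDist : List (List Int)) : List (List Int) :=
  ((PySem.List.pyRange 0 (forwardRouteDist.length : Int) 1).foldl (fun st i =>
    (PySem.List.pyRange 0 (returnRouteDist.length : Int) 1).foldl (fun st j =>
      let sum_dist := PySem.List.pyGetD (PySem.List.pyGetD forwardRouteDist i []) 1 0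
                    + PySem.List.pyGetD (PySem.List.pyGetD returnRouteDist j []) 1 0
      if sum_dist ≤ maxTravelDist then
        if st.2 < sum_dist then ([[i + 1, j + 1]], sum_dist)
        else if st.2 = sum_dist then (st.1 ++ [[i + 1, j + 1]], st.2)
        else st
      else st) st) (([] : List (List Int)), (-1 : Int))).1

-- ===== PORT B =====
def optimalDistance_alt (maxTravelDist : Int) (forwardRouteDist : List (List Int)) (returnRouteDist : List (List Int)) : List (List Int) :=
  if forwardRouteDist = [] ∨ returnRouteDist = [] then []
  else
    let fs := forwardRouteDist.map (fun row => PySem.List.pyGetD row 1 0)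
    let rs := returnRouteDist.map (fun row => PySem.List.pyGetD row 1 0)
    let best := (PySem.List.max? ((-1 : Int) ::
      fs.flatMap (fun f => (rs.map (fun r => f + r)).filter (fun s => s ≤ maxTravelDist)))
      (fun x => x)).getD 0
    if maxTravelDist < best then []
    else
      let jd := (PySem.List.enumerate rs 0).foldl
        (fun d p => d.modify p.2 ([] : List Int) (fun l => l ++ [p.1 + 1])) PySem.Dict.empty
      (PySem.List.enumerate fs 0).flatMap (fun p =>
        (jd.getD (best - p.2) []).map (fun j => [p.1 + 1, j]))

-- ===== PRECONDITION & SPEC =====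
-- Pre_ excludes exactly the inputs on which the Python A raises IndexError: both route lists
-- nonempty (so row[1] is actually evaluated) while some row has fewer than 2 entries.
def Pre_optimalDistance (maxTravelDist : Int) (forwardRouteDist : List (List Int)) (returnRouteDist : List (List Int)) : Prop :=
  forwardRouteDist = [] ∨ returnRouteDist = [] ∨
    ((∀ row ∈ forwardRouteDist, 2 ≤ row.length) ∧ (∀ row ∈ returnRouteDist, 2 ≤ row.length))
instance (maxTravelDist : Int) (forwardRouteDist : List (List Int)) (returnRouteDist : List (List Int)) : Decidable (Pre_optimalDistance maxTravelDist forwardRouteDist returnRouteDist) := by unfold Pre_optimalDistance; infer_instance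
def pvWitness_optimalDistance : Int × List (List Int) × List (List Int) :=
  (10, [[1, 2], [3, 4]], [[1, 3], [2, 6]])
def Spec_optimalDistance (maxTravelDist : Int) (forwardRouteDist : List (List Int)) (returnRouteDist : List (List Int)) (out : List (List Int)) : Prop := out = optimalDistance_alt maxTravelDist forwardRouteDist returnRouteDist
instance (maxTravelDist : Int) (forwardRouteDist : List (List Int)) (returnRouteDist : List (List Int)) (out : List (List Int)) : Decidable (Spec_optimalDistance maxTravelDist forwardRouteDist returnRouteDist out) := by unfold Spec_optimalDistance; infer_instance

-- ===== CLAIM (what is proved, stated in full; the proofs are below) =====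
def Claim_equal_optimalDistance : Prop := ∀ (maxTravelDist : Int) (forwardRouteDist : List (List Int)) (returnRouteDist : List (List Int)), Dom_optimalDistance maxTravelDist forwardRouteDist returnRouteDist → Pre_optimalDistance maxTravelDist forwardRouteDist returnRouteDist → Spec_optimalDistance maxTravelDist forwardRouteDist returnRouteDist (optimalDistance maxTravelDist forwardRouteDist returnRouteDist)

-- ===== LEMMAS AND PROOFS =====

-- value of row[1] (with default), shared abbreviation for the proofs
def pvVal (row : List Int) : Int := PySem.List.pyGetD row 1 0

-- the "running best" update of A's loop, on a bare sum
def pvStepT (m t s : Int) : Int := if s ≤ m ∧ t < s then s else t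

-- A's loop step on an (output row, sum) item
def pvStepA (m : Int) (st : List (List Int) × Int) (x : List Int × Int) : List (List Int) × Int :=
  if x.2 ≤ m then
    if st.2 < x.2 then ([x.1], x.2)
    else if st.2 = x.2 then (st.1 ++ [x.1], st.2)
    else st
  else st

theorem pvT_le (m : Int) : ∀ (S : List Int) (t : Int), t ≤ S.foldl (pvStepT m) t := by
  intro S
  induction S with
  | nil => intro t; simp
  | cons s S ih =>
    intro t
    have h := ih (pvStepT m t s)
    have : t ≤ pvStepT m t s := by unfold pvStepT; split <;> omega
    simpa using le_trans this h

theorem pvT_cases (m : Int) : ∀ (S : List Int) (t : Int),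
    S.foldl (pvStepT m) t = t ∨ S.foldl (pvStepT m) t ≤ m := by
  intro S
  induction S with
  | nil => intro t; left; rfl
  | cons s S ih =>
    intro t
    rcases ih (pvStepT m t s) with h | h
    · simp only [List.foldl_cons] at *
      rw [h]
      unfold pvStepT; split
      · right; omega
      · left; rfl
    · right; simpa using h

-- the main invariant of A's loop over any item list
theorem pvFoldA_char (m : Int) : ∀ (L : List (List Int × Int)) (a : List (List Int)) (t : Int),
    L.foldl (pvStepA m) (a, t) =
      ((if t = (L.map (·.2)).foldl (pvStepT m) t then a else []) ++
        (L.filter (fun x => decide (x.2 ≤ m) && decide (x.2 = (L.map (·.2)).foldl (pvStepT m) t))).map (·.1),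
       (L.map (·.2)).foldl (pvStepT m) t) := by
  intro L
  induction L with
  | nil => intro a t; simp
  | cons x L ih =>
    intro a t
    simp only [List.foldl_cons, List.map_cons, List.filter_cons]
    by_cases he : x.2 ≤ m
    · by_cases hlt : t < x.2
      · have hstep : pvStepA m (a, t) x = ([x.1], x.2) := by
          unfold pvStepA; simp [he, hlt]
        have hT : pvStepT m t x.2 = x.2 := by unfold pvStepT; simp [he, hlt]
        rw [hstep]; simp only [hT]; rw [ih]
        set T := (L.map (·.2)).foldl (pvStepT m) x.2 with hTdef
        have hle : x.2 ≤ T := pvT_le m _ _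
        have hne : t ≠ T := by omega
        by_cases hx : x.2 = T
        · have hTm : T ≤ m := by omega
          simp [hx, hne, hTm]
        · simp [hx, hne, he]
      · by_cases heq : t = x.2
        · have hstep : pvStepA m (a, t) x = (a ++ [x.1], t) := by
            unfold pvStepA; simp [he, heq]
          have hT : pvStepT m t x.2 = t := by unfold pvStepT; simp [hlt]
          rw [hstep]; simp only [hT]; rw [ih]
          set T := (L.map (·.2)).foldl (pvStepT m) t with hTdef
          by_cases hx : t = T
          · have hTm : T ≤ m := by omega
            simp [← heq, hx, hTm]
          · simp [← heq, hx]
        · -- x.2 < t : item ignored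
          have hstep : pvStepA m (a, t) x = (a, t) := by
            unfold pvStepA; simp [he, hlt, heq]
          have hT : pvStepT m t x.2 = t := by unfold pvStepT; simp [hlt]
          rw [hstep]; simp only [hT]; rw [ih]
          set T := (L.map (·.2)).foldl (pvStepT m) t with hTdef
          have hle : t ≤ T := pvT_le m _ _
          have hx : ¬ (x.2 = T) := by omega
          simp [hx]
    · have hstep : pvStepA m (a, t) x = (a, t) := by
        unfold pvStepA; simp [he]
      have hT : pvStepT m t x.2 = t := by unfold pvStepT; simp [he]
      rw [hstep]; simp only [hT]; rw [ih]
      simp [he]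

-- running best = max over the eligible (filtered) sums
theorem pvT_eq_max (m : Int) : ∀ (S : List Int) (t : Int),
    S.foldl (pvStepT m) t = (S.filter (fun s => decide (s ≤ m))).foldl max t := by
  intro S
  induction S with
  | nil => intro t; rfl
  | cons s S ih =>
    intro t
    simp only [List.foldl_cons, List.filter_cons]
    by_cases he : s ≤ m
    · have : pvStepT m t s = max t s := by
        unfold pvStepT
        by_cases h : t < s
        · simp [he, h, max_eq_right (le_of_lt h)]
        · simp [he, h, max_eq_left (by omega : s ≤ t)]
      simp [he, this, ih]
    · have : pvStepT m t s = t := by unfold pvStepT; simp [he]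
      simp [he, this, ih]

-- enumerate commutes with map on the values
theorem pvEnumerate_map {α β : Type} (g : α → β) : ∀ (l : List α) (s : Int),
    PySem.List.enumerate (l.map g) s = (PySem.List.enumerate l s).map (fun p => (p.1, g p.2)) := by
  intro l
  induction l with
  | nil => intro s; simp [PySem.List.enumerate]
  | cons x l ih => intro s; simp [PySem.List.enumerate_cons, ih]

-- the grouping dictionary of B: lookup returns the 1-based indices of matching values, in order
theorem pvJd_getD : ∀ (l : List Int) (s : Int) (d : PySem.Dict Int (List Int)) (v : Int),
    ((PySem.List.enumerate l s).foldl
        (fun d p => d.modify p.2 ([] : List Int) (fun a => a ++ [p.1 + 1])) d).getD v []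
      = d.getD v [] ++
        ((PySem.List.enumerate l s).filter (fun p => decide (p.2 = v))).map (fun p => p.1 + 1) := by
  intro l
  induction l with
  | nil => intro s d v; simp [PySem.List.enumerate]
  | cons x l ih =>
    intro s d v
    simp only [PySem.List.enumerate_cons, List.foldl_cons, List.filter_cons]
    rw [ih]
    by_cases hv : x = v
    · subst hv
      simp
    · have : ¬ ((x : Int) = v) := hv
      simp [PySem.Dict.getD_modify, hv, Ne.symm hv]

-- A rewritten as a single fold over the flattened (output row, sum) item list
theorem pvA_eq_fold (m : Int) (fwd ret : List (List Int)) :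
    optimalDistance m fwd ret =
      (((PySem.List.enumerate fwd 0).flatMap (fun p =>
          (PySem.List.enumerate ret 0).map (fun q =>
            ([p.1 + 1, q.1 + 1], pvVal p.2 + pvVal q.2)))).foldl (pvStepA m)
        (([] : List (List Int)), (-1 : Int))).1 := by
  unfold optimalDistance
  rw [PySem.List.enumerate_eq_map_pyRange fwd ([] : List Int),
      PySem.List.enumerate_eq_map_pyRange ret ([] : List Int)]
  simp only [List.flatMap_map, List.map_map, List.foldl_flatMap, List.foldl_map, PySem.List.len]
  rfl

-- the item list of pvA_eq_fold, named for the final proof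
def pvItems (fwd ret : List (List Int)) : List (List Int × Int) :=
  (PySem.List.enumerate fwd 0).flatMap (fun p =>
    (PySem.List.enumerate ret 0).map (fun q =>
      ([p.1 + 1, q.1 + 1], pvVal p.2 + pvVal q.2)))

-- map over enumerate projects back to a plain map
theorem pvMapEnum {α β : Type} (g : α → β) : ∀ (l : List α) (s : Int),
    (PySem.List.enumerate l s).map (fun p => g p.2) = l.map g := by
  intro l
  induction l with
  | nil => intro s; simp [PySem.List.enumerate]
  | cons x l ih => intro s; simp [PySem.List.enumerate_cons, ih]

-- the best eligible sum B computes equals the running best of A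
theorem pvBest_eq (m : Int) (fwd ret : List (List Int)) :
    ((fwd.map pvVal).flatMap (fun f =>
        (((ret.map pvVal)).map (fun r => f + r)).filter (fun s => decide (s ≤ m)))).foldl max (-1)
      = ((pvItems fwd ret).map (·.2)).foldl (pvStepT m) (-1) := by
  rw [pvT_eq_max]
  congr 1
  unfold pvItems
  simp only [List.map_flatMap, List.map_map, List.filter_flatMap]
  rw [← pvMapEnum pvVal fwd 0, List.flatMap_map]
  congr 1
  funext p
  congr 1
  exact (pvMapEnum (fun row => pvVal p.2 + pvVal row) ret 0).symm

-- ===== VERDICT (by name: the statement is the Claim_ definition above) =====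
theorem optimalDistance_spec : Claim_equal_optimalDistance := by
  intro m fwd ret _hdom _hpre
  unfold Spec_optimalDistance optimalDistance_alt
  by_cases hnil : fwd = [] ∨ ret = []
  · rw [if_pos hnil]
    rcases hnil with h | h <;> subst h <;>
      simp [pvA_eq_fold, PySem.List.enumerate, List.flatMap]
  · rw [if_neg hnil]
    simp only [show (fun row => PySem.List.pyGetD row 1 0) = pvVal from rfl]
    rw [PySem.List.max?_id_cons, Option.getD_some]
    rw [pvA_eq_fold m fwd ret]
    rw [show ((PySem.List.enumerate fwd 0).flatMap (fun p =>
          (PySem.List.enumerate ret 0).map (fun q =>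
            ([p.1 + 1, q.1 + 1], pvVal p.2 + pvVal q.2)))) = pvItems fwd ret from rfl]
    rw [pvFoldA_char m (pvItems fwd ret) [] (-1)]
    rw [← pvBest_eq m fwd ret]
    set best := ((fwd.map pvVal).flatMap (fun f =>
        (((ret.map pvVal)).map (fun r => f + r)).filter (fun s => decide (s ≤ m)))).foldl max (-1) with hbest
    simp only [ite_self, List.nil_append]
    by_cases hlt : m < best
    · rw [if_pos hlt]
      have hcase : best = -1 ∨ best ≤ m := by
        rw [hbest, pvBest_eq]; exact pvT_cases m _ _
      have hb1 : best = -1 := hcase.elim (fun h => h) (fun h => by omega)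
      rw [List.map_eq_nil_iff, List.filter_eq_nil_iff]
      intro x _hx
      simp only [Bool.and_eq_true, decide_eq_true_eq, not_and]
      omega
    · rw [if_neg hlt]
      simp only [pvJd_getD, PySem.Dict.getD_empty, List.nil_append]
      simp only [pvEnumerate_map pvVal]
      unfold pvItems
      simp only [List.filter_flatMap, List.filter_map, List.map_flatMap, List.flatMap_map,
        List.map_map]
      congr 1
      funext p
      congr 1
      apply List.filter_congr
      intro q _
      simp only [Function.comp_apply, ← Bool.decide_and, decide_eq_decide]
      constructor <;> (intro h'; omega)
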